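-- pv_equiv track=rewrite | github.com/jclewis7682/SDN | myPythonScripts/MidTermv2.py | vlanDict
-- ===== SOURCE A (Python) =====
-- def vlanDict(vlan, ip):
--
--     ###sets a blank dictionary
--     thisDict = {}
--
--
--     ###To-Do: create a test to see if both lists are the same length
--
--     ###loops through each vlan
--     for vlanInt in vlan:
--
--         ###loops through each ip addr
--         for ipNum in ip:
--
--
--             ###takes the first ip and pairs it with the first key
--             thisDict[vlanInt] = ipNum
--
--             ###these two parts are needed.  the remove, removes the first ip
--             ###from the list so the for loop does not keep looping till the last ip
--             ###the break stops it at that first ip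
--             ip.remove(ipNum)
--             break
--
--     ###returns the full dictionary
--     return thisDict
-- ===== SOURCE B (Python) =====
-- def vlanDict(vlan, ip):
--     n = min(len(vlan), len(ip))
--     thisDict = dict(zip(vlan, ip[:n]))
--     del ip[:n]
--     return thisDict
-- ===== Notes on version B (the rewrite author's own statement) =====
-- stated objective: idiomatic
-- what changed: Replaces the nested loop with per-element list.remove by a single dict(zip(vlan, ip[:n])) plus one bulk 'del ip[:n]' for the same mutation of ip.
import Mathlib
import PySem

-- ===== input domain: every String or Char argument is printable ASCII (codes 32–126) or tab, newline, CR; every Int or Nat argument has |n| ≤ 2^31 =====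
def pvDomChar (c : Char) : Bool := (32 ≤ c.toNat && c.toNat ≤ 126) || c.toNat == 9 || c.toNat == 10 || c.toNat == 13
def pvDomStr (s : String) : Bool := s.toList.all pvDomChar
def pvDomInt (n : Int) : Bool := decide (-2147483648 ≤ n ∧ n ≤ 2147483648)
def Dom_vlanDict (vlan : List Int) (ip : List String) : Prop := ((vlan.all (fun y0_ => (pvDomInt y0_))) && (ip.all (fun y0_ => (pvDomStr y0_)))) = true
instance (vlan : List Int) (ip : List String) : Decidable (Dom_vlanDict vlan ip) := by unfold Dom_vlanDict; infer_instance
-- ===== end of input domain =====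

-- B replaces A's nested loop with per-element list.remove by dict(zip) plus a bulk del;
-- B performs the same in-place mutation of ip as A; the theorem is about the return value.


-- ===== PORT A =====
-- A: for each vlanInt, the inner loop takes the current first element of ip (if any),
-- stores thisDict[vlanInt] = that element, removes it from ip, and breaks.
def vlanDict (vlan : List Int) (ip : List String) : List (Int × String) :=
  (vlan.foldl
    (fun st vlanInt =>
      match st.2 with
      | [] => st                                   -- inner for loop runs zero times
      | ipNum :: rest => (st.1.insert vlanInt ipNum, rest))  -- assign, remove first, break
    ((PySem.Dict.empty : PySem.Dict Int String), ip)).1.items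

-- ===== PORT B =====
-- B: dict(zip(vlan, ip[:n])) with n = min of the lengths; zip truncates identically.
def vlanDict_alt (vlan : List Int) (ip : List String) : List (Int × String) :=
  ((vlan.zip (ip.take (min vlan.length ip.length))).foldl
    (fun d p => d.insert p.1 p.2)
    (PySem.Dict.empty : PySem.Dict Int String)).items

-- ===== PRECONDITION & SPEC =====
def Spec_vlanDict (vlan : List Int) (ip : List String) (out : List (Int × String)) : Prop := out = vlanDict_alt vlan ip
instance (vlan : List Int) (ip : List String) (out : List (Int × String)) : Decidable (Spec_vlanDict vlan ip out) := by unfold Spec_vlanDict; infer_instance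

-- ===== CLAIM (what is proved, stated in full; the proofs are below) =====
def Claim_equal_vlanDict : Prop := ∀ (vlan : List Int) (ip : List String), Dom_vlanDict vlan ip → Spec_vlanDict vlan ip (vlanDict vlan ip)

-- ===== LEMMAS AND PROOFS =====
theorem loop_nil_ip (vs : List Int) :
    ∀ (d : PySem.Dict Int String),
    (vs.foldl (fun st vlanInt =>
      match st.2 with
      | [] => st
      | ipNum :: rest => (st.1.insert vlanInt ipNum, rest))
      ((d, ([] : List String)))) = (d, []) := by
  induction vs with
  | nil => intro d; rfl
  | cons w ws ihw => intro d; simpa using ihw d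

theorem zip_take_len (vlan : List Int) :
    ∀ (ip : List String), vlan.zip (ip.take vlan.length) = vlan.zip ip := by
  induction vlan with
  | nil => intro ip; simp
  | cons v vs ih =>
    intro ip
    cases ip with
    | nil => simp
    | cons x rest => simp [ih rest]

theorem vlanDict_loop_eq (vlan : List Int) :
    ∀ (ip : List String) (d : PySem.Dict Int String),
    (vlan.foldl
      (fun st vlanInt =>
        match st.2 with
        | [] => st
        | ipNum :: rest => (st.1.insert vlanInt ipNum, rest)) (d, ip)).1
    = (vlan.zip ip).foldl (fun d p => d.insert p.1 p.2) d := by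
  induction vlan with
  | nil => intro ip d; simp
  | cons v vs ih =>
    intro ip d
    cases ip with
    | nil =>
      simp only [List.foldl_cons, List.zip_nil_right, List.foldl_nil]
      simpa using congrArg Prod.fst (loop_nil_ip vs d)
    | cons x rest =>
      simp only [List.foldl_cons, List.zip_cons_cons]
      exact ih rest (d.insert v x)

theorem zip_take_min (vlan : List Int) (ip : List String) :
    vlan.zip (ip.take (min vlan.length ip.length)) = vlan.zip ip := by
  rcases le_total vlan.length ip.length with h | h
  · rw [min_eq_left h, zip_take_len]
  · rw [min_eq_right h, List.take_of_length_le le_rfl]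

-- ===== VERDICT (by name: the statement is the Claim_ definition above) =====
theorem vlanDict_spec : Claim_equal_vlanDict := by
  intro vlan ip _
  unfold Spec_vlanDict vlanDict vlanDict_alt
  rw [vlanDict_loop_eq, zip_take_min]
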